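-- pv_equiv track=rewrite | github.com/ThinkLock/GA | utils.py | convert_hand_over
-- ===== SOURCE A (Python) =====
-- def convert_hand_over(hand_over, cell_list):
--     res = []
--     for i, content in cell_list.items():
--         item = []
--         for j, c in cell_list.items():
--             hij = (hand_over[i][j] if j in hand_over[i].keys() else 0) if i in hand_over.keys() else 0
--             item.append(hij)
--         res.append(item)
--     return res
-- ===== SOURCE B (Python) =====
-- def convert_hand_over(hand_over, cell_list):
--     pos = {key: idx for idx, key in enumerate(cell_list)}
--     n = len(cell_list)
--     res = [[0] * n for _ in range(n)]
--     for i, row in hand_over.items():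
--         ri = pos.get(i)
--         if ri is not None:
--             for j, v in row.items():
--                 rj = pos.get(j)
--                 if rj is not None:
--                     res[ri][rj] = v
--     return res
-- ===== Notes on version B (the rewrite author's own statement) =====
-- stated objective: faster
-- what changed: A probes a dict for every (i,j) cell of the dense n×n grid; B builds a key→index table once, allocates an n×n zero matrix in bulk and scatters only hand_over's actual entries into it.
import Mathlib
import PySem

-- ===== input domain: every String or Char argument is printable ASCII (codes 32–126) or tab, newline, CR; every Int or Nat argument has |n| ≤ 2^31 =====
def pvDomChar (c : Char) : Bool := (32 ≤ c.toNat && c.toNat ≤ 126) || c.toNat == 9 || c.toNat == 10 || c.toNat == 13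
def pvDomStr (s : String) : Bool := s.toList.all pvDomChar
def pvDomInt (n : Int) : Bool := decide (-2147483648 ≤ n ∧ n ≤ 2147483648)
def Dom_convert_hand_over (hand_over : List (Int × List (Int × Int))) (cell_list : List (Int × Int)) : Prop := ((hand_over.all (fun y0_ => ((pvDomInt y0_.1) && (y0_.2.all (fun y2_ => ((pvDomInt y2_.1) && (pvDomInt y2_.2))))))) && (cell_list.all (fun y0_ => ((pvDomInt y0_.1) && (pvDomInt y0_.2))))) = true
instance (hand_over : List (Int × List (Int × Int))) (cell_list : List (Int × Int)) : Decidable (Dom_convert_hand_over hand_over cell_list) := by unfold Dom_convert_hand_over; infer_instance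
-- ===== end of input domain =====

-- B replaces A's dense per-cell membership scan by a zero-initialized matrix plus a sparse
-- scatter over hand_over's entries driven by a key→index table (alternative decomposition).

-- ===== PORT A =====
-- Python dict parameters arrive as association lists; PySem.Dict.ofList rebuilds the dict
-- (last value wins, first position kept — exactly Python's dict construction).
def convert_hand_over (hand_over : List (Int × List (Int × Int))) (cell_list : List (Int × Int)) : List (List Int) :=
  let ho : PySem.Dict Int (PySem.Dict Int Int) :=
    PySem.Dict.ofList (hand_over.map (fun p => (p.1, PySem.Dict.ofList p.2)))
  let cl : PySem.Dict Int Int := PySem.Dict.ofList cell_list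
  cl.items.foldl (fun res p =>
    res ++ [cl.items.foldl (fun item q =>
      item ++ [if ho.contains p.1 then
                 (if (ho.getD p.1 PySem.Dict.empty).contains q.1 then
                    (ho.getD p.1 PySem.Dict.empty).getD q.1 0
                  else 0)
               else 0]) []]) []

-- ===== PORT B =====
-- pos = {key: idx for idx, key in enumerate(cell_list)}; indices are enumerate's 0,1,2,…,
-- represented as Nat (exact: they are never negative).
def convert_hand_over_alt (hand_over : List (Int × List (Int × Int))) (cell_list : List (Int × Int)) : List (List Int) :=
  let ho : PySem.Dict Int (PySem.Dict Int Int) :=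
    PySem.Dict.ofList (hand_over.map (fun p => (p.1, PySem.Dict.ofList p.2)))
  let cl : PySem.Dict Int Int := PySem.Dict.ofList cell_list
  let pos : PySem.Dict Int Nat := PySem.Dict.ofList cl.keys.zipIdx
  let n := cl.size
  let res0 := List.replicate n (List.replicate n (0 : Int))
  ho.items.foldl (fun res p =>
    match pos.get? p.1 with
    | none => res
    | some ri => p.2.items.foldl (fun res q =>
        match pos.get? q.1 with
        | none => res
        | some rj => res.set ri ((res.getD ri []).set rj q.2)) res) res0

-- ===== PRECONDITION & SPEC =====
def Spec_convert_hand_over (hand_over : List (Int × List (Int × Int))) (cell_list : List (Int × Int)) (out : List (List Int)) : Prop := out = convert_hand_over_alt hand_over cell_list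
instance (hand_over : List (Int × List (Int × Int))) (cell_list : List (Int × Int)) (out : List (List Int)) : Decidable (Spec_convert_hand_over hand_over cell_list out) := by unfold Spec_convert_hand_over; infer_instance

-- ===== CLAIM (what is proved, stated in full; the proofs are below) =====
def Claim_equal_convert_hand_over : Prop := ∀ (hand_over : List (Int × List (Int × Int))) (cell_list : List (Int × Int)), Dom_convert_hand_over hand_over cell_list → Spec_convert_hand_over hand_over cell_list (convert_hand_over hand_over cell_list)

-- ===== LEMMAS AND PROOFS =====

-- B's inner loop (scatter one hand_over row, target row index ri fixed)
def pvRowFold (pos : PySem.Dict Int Nat) (ri : Nat) (M : List (Int × Int)) (res : List (List Int)) : List (List Int) :=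
  M.foldl (fun res q =>
    match pos.get? q.1 with
    | none => res
    | some rj => res.set ri ((res.getD ri []).set rj q.2)) res

-- B's outer loop
def pvOuter (pos : PySem.Dict Int Nat) (L : List (Int × PySem.Dict Int Int)) (res : List (List Int)) : List (List Int) :=
  L.foldl (fun res p =>
    match pos.get? p.1 with
    | none => res
    | some ri => pvRowFold pos ri p.2.items res) res

-- the action of B's inner loop on the single row it touches
def pvRow (pos : PySem.Dict Int Nat) (M : List (Int × Int)) (l : List Int) : List Int :=
  M.foldl (fun l q =>
    match pos.get? q.1 with
    | none => l
    | some rj => l.set rj q.2) l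

theorem pv_alt_eq (hand_over : List (Int × List (Int × Int))) (cell_list : List (Int × Int)) :
    convert_hand_over_alt hand_over cell_list =
      (let ho : PySem.Dict Int (PySem.Dict Int Int) :=
        PySem.Dict.ofList (hand_over.map (fun p => (p.1, PySem.Dict.ofList p.2)))
       let cl : PySem.Dict Int Int := PySem.Dict.ofList cell_list
       pvOuter (PySem.Dict.ofList cl.keys.zipIdx) ho.items
         (List.replicate cl.size (List.replicate cl.size (0 : Int)))) := rfl

theorem pvRow_cons_none (pos : PySem.Dict Int Nat) (q : Int × Int) (M : List (Int × Int))
    (l : List Int) (h : pos.get? q.1 = none) : pvRow pos (q :: M) l = pvRow pos M l := by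
  simp [pvRow, h]

theorem pvRow_cons_some (pos : PySem.Dict Int Nat) (q : Int × Int) (M : List (Int × Int))
    (l : List Int) (rj : Nat) (h : pos.get? q.1 = some rj) :
    pvRow pos (q :: M) l = pvRow pos M (l.set rj q.2) := by
  simp [pvRow, h]

theorem pvRowFold_cons_none (pos : PySem.Dict Int Nat) (ri : Nat) (q : Int × Int)
    (M : List (Int × Int)) (res : List (List Int)) (h : pos.get? q.1 = none) :
    pvRowFold pos ri (q :: M) res = pvRowFold pos ri M res := by
  simp [pvRowFold, h]

theorem pvRowFold_cons_some (pos : PySem.Dict Int Nat) (ri : Nat) (q : Int × Int)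
    (M : List (Int × Int)) (res : List (List Int)) (rj : Nat) (h : pos.get? q.1 = some rj) :
    pvRowFold pos ri (q :: M) res = pvRowFold pos ri M (res.set ri ((res.getD ri []).set rj q.2)) := by
  simp [pvRowFold, h]

theorem pvOuter_cons_none (pos : PySem.Dict Int Nat) (p : Int × PySem.Dict Int Int)
    (L : List (Int × PySem.Dict Int Int)) (res : List (List Int)) (h : pos.get? p.1 = none) :
    pvOuter pos (p :: L) res = pvOuter pos L res := by
  simp [pvOuter, h]

theorem pvOuter_cons_some (pos : PySem.Dict Int Nat) (p : Int × PySem.Dict Int Int)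
    (L : List (Int × PySem.Dict Int Int)) (res : List (List Int)) (ri : Nat)
    (h : pos.get? p.1 = some ri) :
    pvOuter pos (p :: L) res = pvOuter pos L (pvRowFold pos ri p.2.items res) := by
  simp [pvOuter, h]

theorem pv_foldl_app {α β : Type} (l : List α) (g : α → β) (acc : List β) :
    l.foldl (fun r x => r ++ [g x]) acc = acc ++ l.map g := by
  induction l generalizing acc with
  | nil => simp
  | cons x xs ih => simp [List.foldl_cons, ih]

theorem pv_pos_items (ks : List Int) (h : ks.Nodup) :
    (PySem.Dict.ofList ks.zipIdx : PySem.Dict Int Nat).items = ks.zipIdx := by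
  have hfresh : ∀ a ∈ ks.zipIdx, (PySem.Dict.empty : PySem.Dict Int Nat).contains a.1 = false := by
    intro a _; simp [PySem.Dict.contains_empty]
  have hnd : (ks.zipIdx.map Prod.fst).Nodup := by
    rw [List.zipIdx_map_fst]; exact h
  have := PySem.Dict.items_foldl_insert_fresh (l := ks.zipIdx) (k := Prod.fst) (v := Prod.snd)
    (d := PySem.Dict.empty) hfresh hnd
  simpa [PySem.Dict.ofList, PySem.Dict.update, PySem.Dict.empty] using this

theorem pv_pos_char (ks : List Int) (h : ks.Nodup) (k : Int) (a : Nat) :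
    (PySem.Dict.ofList ks.zipIdx : PySem.Dict Int Nat).get? k = some a ↔ ks[a]? = some k := by
  rw [PySem.Dict.get?_eq_some_iff_mem_items _ _ _ (PySem.Dict.nodup_keys_ofList _),
    pv_pos_items ks h, List.mk_mem_zipIdx_iff_getElem?]

theorem pvRow_length (pos : PySem.Dict Int Nat) (M : List (Int × Int)) (l : List Int) :
    (pvRow pos M l).length = l.length := by
  induction M generalizing l with
  | nil => rfl
  | cons q M ih =>
    cases h : pos.get? q.1 with
    | none => rw [pvRow_cons_none pos q M l h]; exact ih l
    | some rj => rw [pvRow_cons_some pos q M l rj h, ih]; simp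

theorem pvRow_entry (ks : List Int) (h : ks.Nodup) (M : List (Int × Int))
    (hM : (M.map Prod.fst).Nodup) (l : List Int) (j : Int) (b : Nat)
    (hb : (PySem.Dict.ofList ks.zipIdx : PySem.Dict Int Nat).get? j = some b) (hbl : b < l.length) :
    (pvRow (PySem.Dict.ofList ks.zipIdx) M l)[b]? =
      (match M.find? (fun q => q.1 == j) with
       | some q => some q.2
       | none => l[b]?) := by
  induction M generalizing l with
  | nil => simp [pvRow]
  | cons q M ih =>
    have hM' : (M.map Prod.fst).Nodup := (List.nodup_cons.mp hM).2
    by_cases hq : q.1 = j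
    · subst hq
      have hnone : M.find? (fun p => p.1 == q.1) = none := by
        apply List.find?_eq_none.mpr
        intro p hp
        simp only [beq_iff_eq]
        intro hc
        exact (List.nodup_cons.mp hM).1 (hc ▸ List.mem_map_of_mem hp)
      rw [pvRow_cons_some _ q M l b hb,
        ih hM' (l.set b q.2) (by simpa using hbl)]
      simp [hnone, List.getElem?_set_self hbl]
    · have hfq : (q.1 == j) = false := by simp [hq]
      simp only [List.find?_cons, hfq]
      cases hrj : (PySem.Dict.ofList ks.zipIdx : PySem.Dict Int Nat).get? q.1 with
      | none => rw [pvRow_cons_none _ q M l hrj]; exact ih hM' l hbl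
      | some rj =>
        have hne : rj ≠ b := by
          intro hrb
          subst hrb
          have h1 := (pv_pos_char ks h q.1 rj).mp hrj
          have h2 := (pv_pos_char ks h j rj).mp hb
          exact hq (by rw [h1] at h2; exact Option.some.inj h2)
        rw [pvRow_cons_some _ q M l rj hrj,
          ih hM' (l.set rj q.2) (by simpa using hbl)]
        cases hf : M.find? (fun p => p.1 == j) <;> simp [List.getElem?_set_ne hne]

theorem pvRowFold_length (pos : PySem.Dict Int Nat) (ri : Nat) (M : List (Int × Int))
    (res : List (List Int)) : (pvRowFold pos ri M res).length = res.length := by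
  induction M generalizing res with
  | nil => rfl
  | cons q M ih =>
    cases h : pos.get? q.1 with
    | none => rw [pvRowFold_cons_none pos ri q M res h]; exact ih res
    | some rj => rw [pvRowFold_cons_some pos ri q M res rj h, ih]; simp

theorem pvRowFold_row_ne (pos : PySem.Dict Int Nat) (ri : Nat) (M : List (Int × Int))
    (res : List (List Int)) (a : Nat) (ha : a ≠ ri) :
    (pvRowFold pos ri M res)[a]? = res[a]? := by
  induction M generalizing res with
  | nil => rfl
  | cons q M ih =>
    cases h : pos.get? q.1 with
    | none => rw [pvRowFold_cons_none pos ri q M res h]; exact ih res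
    | some rj =>
      rw [pvRowFold_cons_some pos ri q M res rj h, ih]
      exact List.getElem?_set_ne (fun hc => ha hc.symm)

theorem pvRowFold_row_self (pos : PySem.Dict Int Nat) (ri : Nat) (M : List (Int × Int))
    (res : List (List Int)) :
    (pvRowFold pos ri M res).getD ri [] = pvRow pos M (res.getD ri []) := by
  induction M generalizing res with
  | nil => rfl
  | cons q M ih =>
    cases h : pos.get? q.1 with
    | none => rw [pvRowFold_cons_none pos ri q M res h, pvRow_cons_none pos q M _ h]; exact ih res
    | some rj =>
      rw [pvRowFold_cons_some pos ri q M res rj h, pvRow_cons_some pos q M _ rj h, ih]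
      by_cases hri : ri < res.length
      · congr 1
        simp [List.getD_eq_getElem?_getD, List.getElem?_set_self hri]
      · have hset : res.set ri ((res.getD ri []).set rj q.2) = res :=
          List.set_eq_of_length_le (Nat.le_of_not_lt hri)
        have hgd : res.getD ri [] = [] := by
          simp [List.getD_eq_getElem?_getD, List.getElem?_eq_none (Nat.le_of_not_lt hri)]
        rw [hset, hgd]
        simp

theorem pvOuter_length (pos : PySem.Dict Int Nat) (L : List (Int × PySem.Dict Int Int))
    (res : List (List Int)) : (pvOuter pos L res).length = res.length := by
  induction L generalizing res with
  | nil => rfl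
  | cons p L ih =>
    cases h : pos.get? p.1 with
    | none => rw [pvOuter_cons_none pos p L res h]; exact ih res
    | some ri => rw [pvOuter_cons_some pos p L res ri h, ih]; exact pvRowFold_length _ _ _ _

theorem pvOuter_row (ks : List Int) (h : ks.Nodup) (L : List (Int × PySem.Dict Int Int))
    (hL : (L.map Prod.fst).Nodup) (res : List (List Int)) (i : Int) (a : Nat)
    (ha : (PySem.Dict.ofList ks.zipIdx : PySem.Dict Int Nat).get? i = some a) :
    (pvOuter (PySem.Dict.ofList ks.zipIdx) L res).getD a [] =
      (match L.find? (fun p => p.1 == i) with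
       | some p => pvRow (PySem.Dict.ofList ks.zipIdx) p.2.items (res.getD a [])
       | none => res.getD a []) := by
  induction L generalizing res with
  | nil => simp [pvOuter]
  | cons p L ih =>
    have hL' : (L.map Prod.fst).Nodup := (List.nodup_cons.mp hL).2
    by_cases hp : p.1 = i
    · subst hp
      have hnone : L.find? (fun p' => p'.1 == p.1) = none := by
        apply List.find?_eq_none.mpr
        intro p' hp'
        simp only [beq_iff_eq]
        intro hc
        exact (List.nodup_cons.mp hL).1 (hc ▸ List.mem_map_of_mem hp')
      rw [pvOuter_cons_some _ p L res a ha, ih hL']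
      simp only [List.find?_cons, BEq.rfl, hnone]
      exact pvRowFold_row_self _ _ _ _
    · have hfp : (p.1 == i) = false := by simp [hp]
      simp only [List.find?_cons, hfp]
      cases hri : (PySem.Dict.ofList ks.zipIdx : PySem.Dict Int Nat).get? p.1 with
      | none => rw [pvOuter_cons_none _ p L res hri]; exact ih hL' res
      | some ri =>
        have hne : a ≠ ri := by
          intro har
          subst har
          have h1 := (pv_pos_char ks h p.1 a).mp hri
          have h2 := (pv_pos_char ks h i a).mp ha
          exact hp (by rw [h1] at h2; exact Option.some.inj h2)
        rw [pvOuter_cons_some _ p L res ri hri, ih hL']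
        have hrow : (pvRowFold (PySem.Dict.ofList ks.zipIdx) ri p.2.items res).getD a [] = res.getD a [] := by
          simp [List.getD_eq_getElem?_getD, pvRowFold_row_ne _ _ _ _ _ hne]
        cases hf : L.find? (fun p' => p'.1 == i) <;> simp only [] <;> rw [hrow]

theorem pv_values_update {κ ν : Type} [BEq κ] [LawfulBEq κ] (l : List (κ × ν)) :
    ∀ (d : PySem.Dict κ ν) (w : ν), w ∈ (d.update l).values → w ∈ d.values ∨ w ∈ l.map Prod.snd := by
  induction l with
  | nil => intro d w hd; exact Or.inl hd
  | cons p l ih =>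
    intro d w hd
    rcases ih (d.insert p.1 p.2) w hd with hc | hc
    · rcases PySem.Dict.mem_values_insert d p.1 p.2 w hc with hc | hc
      · exact Or.inr (by simp [hc])
      · exact Or.inl hc
    · exact Or.inr (by simp at hc ⊢; tauto)

theorem pv_values_ofList {κ ν : Type} [BEq κ] [LawfulBEq κ] (l : List (κ × ν)) (w : ν)
    (hw : w ∈ (PySem.Dict.ofList l).values) : w ∈ l.map Prod.snd := by
  rcases pv_values_update l PySem.Dict.empty w hw with hc | hc
  · simp [PySem.Dict.values, PySem.Dict.empty] at hc
  · exact hc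

theorem pv_find?_get? {κ ν : Type} [BEq κ] [LawfulBEq κ] (d : PySem.Dict κ ν) (i : κ) :
    d.get? i = (match d.items.find? (fun p => p.1 == i) with
                | some p => some p.2
                | none => none) := by
  simp only [PySem.Dict.get?]
  cases d.items.find? (fun p => p.1 == i) <;> rfl

-- ===== VERDICT (by name: the statement is the Claim_ definition above) =====
-- A's cell value, as a function of the two keys
def pvF (ho : PySem.Dict Int (PySem.Dict Int Int)) (i j : Int) : Int :=
  if ho.contains i then
    (if (ho.getD i PySem.Dict.empty).contains j then (ho.getD i PySem.Dict.empty).getD j 0 else 0)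
  else 0

theorem pv_a_eq (hand_over : List (Int × List (Int × Int))) (cell_list : List (Int × Int)) :
    convert_hand_over hand_over cell_list =
      (let ho : PySem.Dict Int (PySem.Dict Int Int) :=
        PySem.Dict.ofList (hand_over.map (fun p => (p.1, PySem.Dict.ofList p.2)))
       let cl : PySem.Dict Int Int := PySem.Dict.ofList cell_list
       cl.items.map (fun p => cl.items.map (fun q => pvF ho p.1 q.1))) := by
  simp only [convert_hand_over, pvF, pv_foldl_app, List.nil_append]

theorem pv_nodup_inner (hand_over : List (Int × List (Int × Int)))
    (p : Int × PySem.Dict Int Int)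
    (hp : p ∈ (PySem.Dict.ofList (hand_over.map (fun r => (r.1, PySem.Dict.ofList r.2))) : PySem.Dict Int (PySem.Dict Int Int)).items) :
    (p.2.items.map Prod.fst).Nodup := by
  have hv : p.2 ∈ (PySem.Dict.ofList (hand_over.map (fun r => (r.1, PySem.Dict.ofList r.2))) : PySem.Dict Int (PySem.Dict Int Int)).values := by
    simp only [PySem.Dict.values]
    exact List.mem_map_of_mem hp
  have := pv_values_ofList _ _ hv
  simp only [List.map_map, List.mem_map] at this
  obtain ⟨r, _, hr⟩ := this
  have : p.2 = PySem.Dict.ofList r.2 := by simpa using hr.symm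
  rw [this]
  exact PySem.Dict.nodup_keys_ofList r.2

theorem convert_hand_over_spec : Claim_equal_convert_hand_over := by
  intro hand_over cell_list _
  unfold Spec_convert_hand_over
  rw [pv_a_eq, pv_alt_eq]
  simp only []
  -- names
  have hks : (PySem.Dict.ofList cell_list : PySem.Dict Int Int).keys.Nodup :=
    PySem.Dict.nodup_keys_ofList cell_list
  have hL : ((PySem.Dict.ofList (hand_over.map (fun p => (p.1, PySem.Dict.ofList p.2))) : PySem.Dict Int (PySem.Dict Int Int)).items.map Prod.fst).Nodup := by
    have := PySem.Dict.nodup_keys_ofList (hand_over.map (fun p => (p.1, PySem.Dict.ofList p.2)))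
    simpa [PySem.Dict.keys] using this
  apply List.ext_getElem?
  intro a
  by_cases han : a < (PySem.Dict.ofList cell_list : PySem.Dict Int Int).size
  case neg =>
    have h1 : ((PySem.Dict.ofList cell_list : PySem.Dict Int Int).items.map
        (fun p => (PySem.Dict.ofList cell_list : PySem.Dict Int Int).items.map
          (fun q => pvF (PySem.Dict.ofList (hand_over.map (fun p => (p.1, PySem.Dict.ofList p.2)))) p.1 q.1)))[a]? = none := by
      apply List.getElem?_eq_none
      simpa [PySem.Dict.size] using Nat.le_of_not_lt han
    have h2 : (pvOuter (PySem.Dict.ofList (PySem.Dict.ofList cell_list : PySem.Dict Int Int).keys.zipIdx)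
        (PySem.Dict.ofList (hand_over.map (fun p => (p.1, PySem.Dict.ofList p.2))) : PySem.Dict Int (PySem.Dict Int Int)).items
        (List.replicate (PySem.Dict.ofList cell_list : PySem.Dict Int Int).size
          (List.replicate (PySem.Dict.ofList cell_list : PySem.Dict Int Int).size (0 : Int))))[a]? = none := by
      apply List.getElem?_eq_none
      rw [pvOuter_length, List.length_replicate]
      exact Nat.le_of_not_lt han
    rw [h1, h2]
  case pos =>
    have hlen_items : a < (PySem.Dict.ofList cell_list : PySem.Dict Int Int).items.length := han
    have hkey : (PySem.Dict.ofList cell_list : PySem.Dict Int Int).keys[a]? =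
        some ((PySem.Dict.ofList cell_list : PySem.Dict Int Int).items[a].1) := by
      simp [PySem.Dict.keys, List.getElem?_eq_getElem hlen_items]
    have ha : (PySem.Dict.ofList (PySem.Dict.ofList cell_list : PySem.Dict Int Int).keys.zipIdx : PySem.Dict Int Nat).get?
        ((PySem.Dict.ofList cell_list : PySem.Dict Int Int).items[a].1) = some a :=
      (pv_pos_char _ hks _ a).mpr hkey
    have hres0 : (List.replicate (PySem.Dict.ofList cell_list : PySem.Dict Int Int).size
        (List.replicate (PySem.Dict.ofList cell_list : PySem.Dict Int Int).size (0 : Int))).getD a [] =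
        List.replicate (PySem.Dict.ofList cell_list : PySem.Dict Int Int).size (0 : Int) := by
      simp [List.getD_eq_getElem?_getD, han]
    have hrow := pvOuter_row _ hks _ hL
      (List.replicate (PySem.Dict.ofList cell_list : PySem.Dict Int Int).size
        (List.replicate (PySem.Dict.ofList cell_list : PySem.Dict Int Int).size (0 : Int)))
      _ a ha
    rw [hres0] at hrow
    have hRlen : (pvOuter (PySem.Dict.ofList (PySem.Dict.ofList cell_list : PySem.Dict Int Int).keys.zipIdx)
        (PySem.Dict.ofList (hand_over.map (fun p => (p.1, PySem.Dict.ofList p.2))) : PySem.Dict Int (PySem.Dict Int Int)).items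
        (List.replicate (PySem.Dict.ofList cell_list : PySem.Dict Int Int).size
          (List.replicate (PySem.Dict.ofList cell_list : PySem.Dict Int Int).size (0 : Int)))).length =
        (PySem.Dict.ofList cell_list : PySem.Dict Int Int).size := by
      rw [pvOuter_length, List.length_replicate]
    rw [List.getElem?_map, List.getElem?_eq_getElem hlen_items,
      List.getElem?_eq_getElem (by rw [hRlen]; exact han)]
    have hgetD : (pvOuter (PySem.Dict.ofList (PySem.Dict.ofList cell_list : PySem.Dict Int Int).keys.zipIdx)
        (PySem.Dict.ofList (hand_over.map (fun p => (p.1, PySem.Dict.ofList p.2))) : PySem.Dict Int (PySem.Dict Int Int)).items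
        (List.replicate (PySem.Dict.ofList cell_list : PySem.Dict Int Int).size
          (List.replicate (PySem.Dict.ofList cell_list : PySem.Dict Int Int).size (0 : Int))))[a] =
        (pvOuter (PySem.Dict.ofList (PySem.Dict.ofList cell_list : PySem.Dict Int Int).keys.zipIdx)
        (PySem.Dict.ofList (hand_over.map (fun p => (p.1, PySem.Dict.ofList p.2))) : PySem.Dict Int (PySem.Dict Int Int)).items
        (List.replicate (PySem.Dict.ofList cell_list : PySem.Dict Int Int).size
          (List.replicate (PySem.Dict.ofList cell_list : PySem.Dict Int Int).size (0 : Int)))).getD a [] := by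
      rw [List.getD_eq_getElem?_getD, List.getElem?_eq_getElem (by rw [hRlen]; exact han)]
      rfl
    rw [Option.map_some, Option.some.injEq, hgetD, hrow]
    have hget := pv_find?_get?
      (PySem.Dict.ofList (hand_over.map (fun p => (p.1, PySem.Dict.ofList p.2))) : PySem.Dict Int (PySem.Dict Int Int))
      ((PySem.Dict.ofList cell_list : PySem.Dict Int Int).items[a].1)
    cases hf : (PySem.Dict.ofList (hand_over.map (fun p => (p.1, PySem.Dict.ofList p.2))) : PySem.Dict Int (PySem.Dict Int Int)).items.find?
        (fun p => p.1 == (PySem.Dict.ofList cell_list : PySem.Dict Int Int).items[a].1) with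
    | none =>
      rw [hf] at hget
      have hc : (PySem.Dict.ofList (hand_over.map (fun p => (p.1, PySem.Dict.ofList p.2))) : PySem.Dict Int (PySem.Dict Int Int)).contains
          ((PySem.Dict.ofList cell_list : PySem.Dict Int Int).items[a].1) = false := by
        rw [PySem.Dict.contains_eq_isSome_get?, hget]; rfl
      simp only []
      simp [pvF, hc, PySem.Dict.size, List.map_const']
    | some p =>
      rw [hf] at hget
      have hp1 : p.1 = (PySem.Dict.ofList cell_list : PySem.Dict Int Int).items[a].1 := by
        have := List.find?_some hf
        simpa using this
      have hmem : p ∈ (PySem.Dict.ofList (hand_over.map (fun r => (r.1, PySem.Dict.ofList r.2))) : PySem.Dict Int (PySem.Dict Int Int)).items :=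
        List.mem_of_find?_eq_some hf
      have hMnodup := pv_nodup_inner hand_over p hmem
      have hcont : (PySem.Dict.ofList (hand_over.map (fun r => (r.1, PySem.Dict.ofList r.2))) : PySem.Dict Int (PySem.Dict Int Int)).contains
          ((PySem.Dict.ofList cell_list : PySem.Dict Int Int).items[a].1) = true := by
        rw [PySem.Dict.contains_eq_isSome_get?, hget]; rfl
      have hgd : (PySem.Dict.ofList (hand_over.map (fun r => (r.1, PySem.Dict.ofList r.2))) : PySem.Dict Int (PySem.Dict Int Int)).getD
          ((PySem.Dict.ofList cell_list : PySem.Dict Int Int).items[a].1) PySem.Dict.empty = p.2 := by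
        rw [PySem.Dict.getD_eq_get?_getD, hget]; rfl
      simp only []
      apply List.ext_getElem?
      intro b
      by_cases hbn : b < (PySem.Dict.ofList cell_list : PySem.Dict Int Int).size
      case neg =>
        rw [List.getElem?_eq_none (by simpa [PySem.Dict.size] using Nat.le_of_not_lt hbn),
          List.getElem?_eq_none (by rw [pvRow_length, List.length_replicate]; exact Nat.le_of_not_lt hbn)]
      case pos =>
        have hlenb : b < (PySem.Dict.ofList cell_list : PySem.Dict Int Int).items.length := hbn
        have hkeyb : (PySem.Dict.ofList cell_list : PySem.Dict Int Int).keys[b]? =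
            some ((PySem.Dict.ofList cell_list : PySem.Dict Int Int).items[b].1) := by
          simp [PySem.Dict.keys, List.getElem?_eq_getElem hlenb]
        have hb : (PySem.Dict.ofList (PySem.Dict.ofList cell_list : PySem.Dict Int Int).keys.zipIdx : PySem.Dict Int Nat).get?
            ((PySem.Dict.ofList cell_list : PySem.Dict Int Int).items[b].1) = some b :=
          (pv_pos_char _ hks _ b).mpr hkeyb
        rw [pvRow_entry _ hks _ hMnodup _ _ b hb (by simpa using hbn)]
        rw [List.getElem?_map, List.getElem?_eq_getElem hlenb]
        have hgetb := pv_find?_get? p.2 ((PySem.Dict.ofList cell_list : PySem.Dict Int Int).items[b].1)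
        cases hg : p.2.items.find? (fun q => q.1 == (PySem.Dict.ofList cell_list : PySem.Dict Int Int).items[b].1) with
        | none =>
          rw [hg] at hgetb
          have hcb : p.2.contains ((PySem.Dict.ofList cell_list : PySem.Dict Int Int).items[b].1) = false := by
            rw [PySem.Dict.contains_eq_isSome_get?, hgetb]; rfl
          simp [pvF, hcont, hgd, hcb, hbn]
        | some q =>
          rw [hg] at hgetb
          have hcb : p.2.contains ((PySem.Dict.ofList cell_list : PySem.Dict Int Int).items[b].1) = true := by
            rw [PySem.Dict.contains_eq_isSome_get?, hgetb]; rfl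
          have hgdb : p.2.getD ((PySem.Dict.ofList cell_list : PySem.Dict Int Int).items[b].1) 0 = q.2 := by
            rw [PySem.Dict.getD_eq_get?_getD, hgetb]; rfl
          simp [pvF, hcont, hgd, hcb, hgdb]
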